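-- pv_equiv track=rewrite | github.com/Noussai24/Module2_test_case_unit_run | import unittest.py | tuple_plus_grand
-- ===== SOURCE A (Python) =====
-- def tuple_plus_grand(list_tuples):
--     # definir un tuple vide
--     plus_grand_tuple = ()
--     max_elements = 0
--
--     for tuple in list_tuples:
--         if len(tuple) > max_elements:
--             max_elements = len(tuple)
--             plus_grand_tuple = tuple
--     return plus_grand_tuple
-- ===== SOURCE B (Python) =====
-- def tuple_plus_grand(list_tuples):
--     if not list_tuples:
--         return ()
--     return sorted(list_tuples, key=len, reverse=True)[0]
-- ===== Notes on version B (the rewrite author's own statement) =====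
-- stated objective: alternative
-- what changed: Replaces the running-max scan with a stable sort by tuple length in descending order and returns the head (stability picks the first tuple of maximal length, exactly as A's strict-greater update does), guarding the empty list explicitly.
import Mathlib
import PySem

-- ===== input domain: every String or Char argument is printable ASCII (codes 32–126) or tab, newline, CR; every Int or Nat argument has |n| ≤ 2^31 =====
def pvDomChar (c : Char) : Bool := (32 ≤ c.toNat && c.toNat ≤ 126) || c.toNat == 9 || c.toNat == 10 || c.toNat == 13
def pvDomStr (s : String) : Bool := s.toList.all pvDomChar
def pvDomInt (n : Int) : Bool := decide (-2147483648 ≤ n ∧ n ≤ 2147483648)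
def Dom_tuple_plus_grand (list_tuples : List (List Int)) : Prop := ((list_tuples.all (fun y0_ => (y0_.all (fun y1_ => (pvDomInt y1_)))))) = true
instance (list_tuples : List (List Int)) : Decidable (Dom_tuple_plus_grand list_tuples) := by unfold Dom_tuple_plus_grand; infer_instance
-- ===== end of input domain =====

-- B replaces A's running-max scan by a stable descending sort on tuple length and takes the head
-- (with an explicit empty-list guard): an alternative decomposition, not faster.

-- ===== PORT A =====
-- running-max loop: state (plus_grand_tuple, max_elements)
def tuple_plus_grand (list_tuples : List (List Int)) : List Int :=
  (list_tuples.foldl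
    (fun (st : List Int × Int) t =>
      if (t.length : Int) > st.2 then (t, (t.length : Int)) else st)
    (([] : List Int), (0 : Int))).1

-- ===== PORT B =====
-- 'if not list_tuples: return ()' then 'sorted(list_tuples, key=len, reverse=True)[0]'
-- ([0] on the nonempty sorted list, which is nonempty, ported as headD)
def tuple_plus_grand_alt (list_tuples : List (List Int)) : List Int :=
  if list_tuples = [] then []
  else (PySem.List.sorted list_tuples (fun t => (t.length : Int)) true).headD []

-- ===== PRECONDITION & SPEC =====
def Spec_tuple_plus_grand (list_tuples : List (List Int)) (out : List Int) : Prop := out = tuple_plus_grand_alt list_tuples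
instance (list_tuples : List (List Int)) (out : List Int) : Decidable (Spec_tuple_plus_grand list_tuples out) := by unfold Spec_tuple_plus_grand; infer_instance

-- ===== CLAIM (what is proved, stated in full; the proofs are below) =====
def Claim_equal_tuple_plus_grand : Prop := ∀ (list_tuples : List (List Int)), Dom_tuple_plus_grand list_tuples → Spec_tuple_plus_grand list_tuples (tuple_plus_grand list_tuples)

-- ===== LEMMAS AND PROOFS =====

-- A's loop body, named for the proofs (definitionally the lambda in the port)
def pvStepA (st : List Int × Int) (t : List Int) : List Int × Int :=
  if (t.length : Int) > st.2 then (t, (t.length : Int)) else st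

theorem pvStepA_pos {st : List Int × Int} {t : List Int} (h : (t.length : Int) > st.2) :
    pvStepA st t = (t, (t.length : Int)) := by simp [pvStepA, h]

theorem pvStepA_neg {st : List Int × Int} {t : List Int} (h : ¬ (t.length : Int) > st.2) :
    pvStepA st t = st := by simp [pvStepA, h]

-- The strict-descending insertion comparator used by sorted … true
def pvBefore (x y : List Int) : Bool := decide ((y.length : Int) < (x.length : Int))

-- the relation the two folds preserve: either nothing processed yet, or the
-- accumulator's head is A's current best and A's max is its length
def pvRel (best : List Int) (maxlen : Int) (acc : List (List Int)) : Prop :=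
  (acc = [] ∧ best = [] ∧ maxlen = 0) ∨
  (∃ t, acc = best :: t ∧ maxlen = (best.length : Int))

theorem insertBy_head (x h : List Int) (t : List (List Int)) :
    PySem.List.insertBy pvBefore x (h :: t) =
      if pvBefore x h then x :: h :: t else h :: PySem.List.insertBy pvBefore x t := by
  simp [PySem.List.insertBy]

theorem pvLoop (xs : List (List Int)) :
    ∀ (best : List Int) (maxlen : Int) (acc : List (List Int)),
    pvRel best maxlen acc →
    pvRel ((xs.foldl pvStepA (best, maxlen)).1) ((xs.foldl pvStepA (best, maxlen)).2)
      (xs.foldl (fun acc x => PySem.List.insertBy pvBefore x acc) acc) := by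
  induction xs with
  | nil => intro best maxlen acc h; simpa using h
  | cons x xs ih =>
    intro best maxlen acc h
    simp only [List.foldl_cons]
    rcases h with ⟨hacc, hbest, hmax⟩ | ⟨t, hacc, hmax⟩
    · subst hacc hbest hmax
      by_cases hx : (x.length : Int) > (0 : Int)
      · rw [pvStepA_pos hx]
        apply ih
        refine Or.inr ⟨[], ?_, rfl⟩
        simp [PySem.List.insertBy]
      · rw [pvStepA_neg hx]
        have hxnil : x = [] := List.length_eq_zero_iff.mp (by omega)
        apply ih
        refine Or.inr ⟨[], ?_, by simp⟩
        simp [PySem.List.insertBy, hxnil]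
    · subst hacc hmax
      rw [insertBy_head]
      by_cases hb : pvBefore x best
      · have hgt : (x.length : Int) > (best.length : Int) := by
          simpa [pvBefore] using hb
        rw [if_pos hb, pvStepA_pos hgt]
        apply ih
        exact Or.inr ⟨best :: t, rfl, rfl⟩
      · have hle : ¬ (x.length : Int) > (best.length : Int) := by
          simpa [pvBefore] using hb
        rw [if_neg hb, pvStepA_neg hle]
        apply ih
        exact Or.inr ⟨PySem.List.insertBy pvBefore x t, rfl, rfl⟩

-- ===== VERDICT (by name: the statement is the Claim_ definition above) =====
theorem tuple_plus_grand_spec : Claim_equal_tuple_plus_grand := by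
  intro xs _
  unfold Spec_tuple_plus_grand tuple_plus_grand_alt
  by_cases hnil : xs = []
  · subst hnil; rfl
  · rw [if_neg hnil]
    have hA : tuple_plus_grand xs = (xs.foldl pvStepA ([], 0)).1 := rfl
    have hsorted : PySem.List.sorted xs (fun t => (t.length : Int)) true =
        xs.foldl (fun acc x => PySem.List.insertBy pvBefore x acc) [] :=
      PySem.List.sorted_rev_eq_foldl_insertBy xs (fun t => (t.length : Int))
    have h := pvLoop xs [] 0 [] (Or.inl ⟨rfl, rfl, rfl⟩)
    rcases h with ⟨hacc, hbest, _⟩ | ⟨t, hacc, _⟩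
    · exfalso
      have : PySem.List.sorted xs (fun t => (t.length : Int)) true = [] := by
        rw [hsorted, hacc]
      exact hnil ((PySem.List.sorted_eq_nil_iff _ _ _).mp this)
    · rw [hA, hsorted, hacc]
      simp
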